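-- pv_equiv track=rewrite | github.com/plazmaforge/plazma-lib | src/main/python/plazma/lib/str/strlib.py | isColumnText
-- ===== SOURCE A (Python) =====
-- def isEmpty(str):
--     if str is None:
--         return True
--     return len(str) == 0
--
-- def size(str):
--     if str is None:
--         return 0
--     return len(str)
--
-- def isColumnSeparator(ch):
--     if ch is None:
--         return False
--     return ch == '\r' or ch == '\n' or ch == '\t' # TODO: Use constant COLUMN_SEPARATORS = '\r\n\t'
--
-- def isColumnText(str, len = None):
--     if isEmpty(str):
--         return False
--
--     if len is None:
--         len = size(str)
--     if len < 1:
--         return False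
--
--     strLen = size(str)
--     if len >  strLen:
--         len = strLen
--
--     #Use pos
--     #return findFirstOf(str, '\r\n\t') != -1 # TODO: Use constant COLUMN_SEPARATORS = '\r\n\t'
--
--     i = 0
--     while i < len:
--         if isColumnSeparator(str[i]):
--             return True
--         i += 1
--     return False
-- ===== SOURCE B (Python) =====
-- def isColumnText(str, len=None):
--     # B: compute the prefix once (slicing clamps; str[:None] is the whole
--     # string) and iterate over the fixed separator alphabet with built-in
--     # substring search, instead of scanning the prefix char by char.
--     if not str:
--         return False
--     if len is not None and len < 1:
--         return False
--     prefix = str[:len]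
--     return any(sep in prefix for sep in '\r\n\t')
-- ===== Notes on version B (the rewrite author's own statement) =====
-- stated objective: idiomatic
-- what changed: B computes the clamped prefix once via slicing and inverts the loop: it iterates over the fixed separator alphabet '\r\n\t' testing substring containment, instead of A's index-based while loop testing each prefix character against the separators.
import Mathlib
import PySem

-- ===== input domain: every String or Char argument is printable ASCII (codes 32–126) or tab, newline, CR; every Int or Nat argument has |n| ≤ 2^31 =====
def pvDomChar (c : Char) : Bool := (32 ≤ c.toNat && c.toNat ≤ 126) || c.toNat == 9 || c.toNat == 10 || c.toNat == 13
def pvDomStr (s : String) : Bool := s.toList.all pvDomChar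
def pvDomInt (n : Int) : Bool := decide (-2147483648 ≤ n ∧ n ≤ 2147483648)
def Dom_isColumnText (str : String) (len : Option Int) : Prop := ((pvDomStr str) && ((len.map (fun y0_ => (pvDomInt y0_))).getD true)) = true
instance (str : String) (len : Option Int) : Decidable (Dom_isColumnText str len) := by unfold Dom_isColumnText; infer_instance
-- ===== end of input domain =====

-- B computes the clamped prefix once via slicing and iterates over the fixed
-- separator alphabet with substring containment, instead of A's index loop
-- over the prefix characters (objective: idiomatic; same cost).

-- ===== PORT A =====
def pyIsEmptyA (str : String) : Bool := PySem.Str.len str == 0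

def pySizeA (str : String) : Int := PySem.Str.len str

def isColumnSeparatorA (ch : Char) : Bool := ch == '\r' || ch == '\n' || ch == '\t'

-- the 'while i < len' loop; str[i] is in range whenever 0 ≤ i < len ≤ len(str),
-- the none branch (Python IndexError) is unreachable there
def colLoopA (cs : List Char) (len i : Int) : Bool :=
  if i < len then
    match PySem.List.pyGet? cs i with
    | some c => if isColumnSeparatorA c then true else colLoopA cs len (i + 1)
    | none => false
  else false
termination_by (len - i).toNat
decreasing_by omega

def isColumnText (str : String) (len : Option Int) : Bool :=
  if pyIsEmptyA str then false
  else
    let len1 : Int := match len with | none => pySizeA str | some l => l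
    if len1 < 1 then false
    else
      let strLen := pySizeA str
      let len2 := if len1 > strLen then strLen else len1
      colLoopA str.toList len2 0

-- ===== PORT B =====
def isColumnText_alt (str : String) (len : Option Int) : Bool :=
  if PySem.Str.len str == 0 then false          -- 'if not str'
  else if (match len with | some l => decide (l < 1) | none => false) then false
  else
    let prefix_ : List Char := match len with   -- str[:len]; str[:None] is str
      | none => str.toList
      | some l => PySem.List.slice str.toList none (some l)
    ['\r', '\n', '\t'].any (fun sep => PySem.Chars.isIn [sep] prefix_)

-- ===== PRECONDITION & SPEC =====
def Spec_isColumnText (str : String) (len : Option Int) (out : Bool) : Prop := out = isColumnText_alt str len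
instance (str : String) (len : Option Int) (out : Bool) : Decidable (Spec_isColumnText str len out) := by unfold Spec_isColumnText; infer_instance

-- ===== CLAIM (what is proved, stated in full; the proofs are below) =====
def Claim_equal_isColumnText : Prop := ∀ (str : String) (len : Option Int), Dom_isColumnText str len → Spec_isColumnText str len (isColumnText str len)

-- ===== LEMMAS AND PROOFS =====

-- A's loop from index i scans the next (len - i) characters
theorem colLoopA_eq_aux (cs : List Char) (len : Int) (hlen : len ≤ cs.length) :
    ∀ (n : Nat) (i : Int), 0 ≤ i → (len - i).toNat = n →
      colLoopA cs len i = ((cs.drop i.toNat).take (len - i).toNat).any isColumnSeparatorA := by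
  intro n
  induction n with
  | zero =>
    intro i hi hn
    rw [colLoopA]
    have h : ¬ i < len := by omega
    simp [h, hn]
  | succ m ih =>
    intro i hi hn
    rw [colLoopA]
    have h : i < len := by omega
    have hidx : i.toNat < cs.length := by omega
    have hget : PySem.List.pyGet? cs i = some cs[i.toNat] := by
      have hcast : i = (i.toNat : Int) := by omega
      conv_lhs => rw [hcast, PySem.List.pyGet?_natCast]
      simp [hidx]
    simp only [h, if_true, hget]
    rw [List.drop_eq_getElem_cons hidx]
    have htk : (len - i).toNat = (len - (i + 1)).toNat + 1 := by omega
    rw [htk, List.take_succ_cons, List.any_cons]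
    have hrec := ih (i + 1) (by omega) (by omega)
    have hi1 : (i + 1).toNat = i.toNat + 1 := by omega
    rw [hi1] at hrec
    rw [hrec]
    cases hc : isColumnSeparatorA cs[i.toNat] <;> simp

-- A's loop from index 0 scans the first len characters
theorem colLoopA_eq (cs : List Char) (len : Int) (hlen : len ≤ cs.length) :
    colLoopA cs len 0 = (cs.take len.toNat).any isColumnSeparatorA := by
  have := colLoopA_eq_aux cs len hlen (len - 0).toNat 0 le_rfl rfl
  simpa using this

-- a singleton is an infix iff it is a member
theorem singleton_infix_iff {c : Char} {l : List Char} : [c] <:+: l ↔ c ∈ l := by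
  constructor
  · rintro ⟨p, s, h⟩; subst h; simp
  · intro hm
    obtain ⟨p, s, h⟩ := List.append_of_mem hm
    exact ⟨p, s, by simp [h]⟩

theorem any_sep_eq (t : List Char) :
    (['\r', '\n', '\t'].any (fun sep => PySem.Chars.isIn [sep] t)) = t.any isColumnSeparatorA := by
  rw [Bool.eq_iff_iff]
  simp only [List.any_eq_true, List.mem_cons,
    PySem.Chars.isIn_iff_infix, singleton_infix_iff, isColumnSeparatorA]
  constructor
  · rintro ⟨sep, hsep, hm⟩
    exact ⟨sep, hm, by rcases hsep with h|h|h|h <;> simp_all⟩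
  · rintro ⟨c, hc, hsep⟩
    refine ⟨c, ?_, hc⟩
    rcases Bool.or_eq_true_iff.mp hsep with h | h
    · rcases Bool.or_eq_true_iff.mp h with h | h <;> simp_all
    · simp_all

-- ===== VERDICT (by name: the statement is the Claim_ definition above) =====
theorem isColumnText_spec : Claim_equal_isColumnText := by
  intro str len _
  unfold Spec_isColumnText isColumnText isColumnText_alt pyIsEmptyA pySizeA
  simp only [PySem.Str.len_eq]
  rcases len with _ | l
  · -- len = None
    by_cases he : str.toList.length = 0
    · simp [he]
    · have h1 : ¬ ((str.toList.length : Int) == 0) = true := by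
        simp only [beq_iff_eq]
        intro hx; exact he (by exact_mod_cast hx)
      have h2 : ¬ ((str.toList.length : Int) < 1) := by omega
      have h3 : ¬ ((str.toList.length : Int) > (str.toList.length : Int)) := by omega
      simp only [h1, if_false, h2, h3, Bool.false_eq_true]
      rw [colLoopA_eq str.toList _ le_rfl, any_sep_eq]
      rw [Int.toNat_natCast, List.take_length]
  · -- len = some l
    by_cases he : str.toList.length = 0
    · simp [he]
    · have h1 : ¬ ((str.toList.length : Int) == 0) = true := by
        simp only [beq_iff_eq]
        intro hx; exact he (by exact_mod_cast hx)
      by_cases hl : l < 1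
      · simp [hl]
      · have hl0 : 0 ≤ l := by omega
        simp only [h1, Bool.false_eq_true, if_false, hl, decide_eq_true_eq]
        rw [any_sep_eq, PySem.List.slice_to _ hl0]
        by_cases hg : l > (str.toList.length : Int)
        · simp only [hg, if_true]
          rw [colLoopA_eq _ _ le_rfl]
          rw [List.take_of_length_le (by omega), List.take_of_length_le (by omega)]
        · simp only [hg, if_false]
          rw [colLoopA_eq _ _ (by omega)]
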